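-- pv_equiv track=rewrite | github.com/ni-lie/CS199-TreePoset | Utils/Input_Utils.py | isAllConnected
-- ===== SOURCE A (Python) =====
-- def isAllConnected(vertices, relations):
--     for vertex in vertices:
--         isConnected = False
--         for relation in relations:
--             if vertex in relation:
--                 isConnected = True
--                 break
--
--         if not isConnected: return False
--
--     return True
-- ===== SOURCE B (Python) =====
-- def isAllConnected(vertices, relations):
--     present = set()
--     for relation in relations:
--         present.update(relation)
--     return set(vertices) <= present
-- ===== Notes on version B (the rewrite author's own statement) =====
-- stated objective: idiomatic
-- what changed: B builds the union set of all relation members in one pass and decides with a single subset test, instead of rescanning every relation list for each vertex.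
import Mathlib
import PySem

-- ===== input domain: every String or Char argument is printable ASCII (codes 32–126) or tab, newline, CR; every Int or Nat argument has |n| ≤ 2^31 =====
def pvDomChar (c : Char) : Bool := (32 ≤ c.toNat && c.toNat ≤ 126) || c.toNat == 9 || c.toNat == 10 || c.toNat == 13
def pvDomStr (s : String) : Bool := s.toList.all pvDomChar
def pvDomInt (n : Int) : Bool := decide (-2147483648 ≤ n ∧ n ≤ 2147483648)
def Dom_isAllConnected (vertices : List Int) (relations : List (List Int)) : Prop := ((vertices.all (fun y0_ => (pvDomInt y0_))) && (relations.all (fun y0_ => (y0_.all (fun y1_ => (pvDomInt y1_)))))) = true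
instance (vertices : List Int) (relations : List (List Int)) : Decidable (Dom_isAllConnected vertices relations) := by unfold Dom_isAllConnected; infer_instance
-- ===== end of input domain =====

-- B replaces A's per-vertex rescans of the relation lists by one union set
-- built in a single pass followed by a single subset test (idiomatic set algebra).

-- ===== PORT A =====
-- inner 'for relation in relations: if vertex in relation: isConnected = True; break'
def isAllConnectedScan (vertex : Int) : List (List Int) → Bool
  | [] => false
  | relation :: rest =>
      if relation.contains vertex then true else isAllConnectedScan vertex rest

def isAllConnected (vertices : List Int) (relations : List (List Int)) : Bool :=
  match vertices with
  | [] => true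
  | vertex :: rest =>
      if !(isAllConnectedScan vertex relations) then false
      else isAllConnected rest relations

-- ===== PORT B =====
def isAllConnected_alt (vertices : List Int) (relations : List (List Int)) : Bool :=
  let present : PySem.Set Int :=
    relations.foldl (fun s relation => PySem.Set.update s relation) PySem.Set.empty
  PySem.Set.issubset (PySem.Set.ofList vertices) present

-- ===== PRECONDITION & SPEC =====
def Spec_isAllConnected (vertices : List Int) (relations : List (List Int)) (out : Bool) : Prop := out = isAllConnected_alt vertices relations
instance (vertices : List Int) (relations : List (List Int)) (out : Bool) : Decidable (Spec_isAllConnected vertices relations out) := by unfold Spec_isAllConnected; infer_instance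

-- ===== CLAIM (what is proved, stated in full; the proofs are below) =====
def Claim_equal_isAllConnected : Prop := ∀ (vertices : List Int) (relations : List (List Int)), Dom_isAllConnected vertices relations → Spec_isAllConnected vertices relations (isAllConnected vertices relations)

-- ===== LEMMAS AND PROOFS =====

theorem scan_iff (v : Int) (rs : List (List Int)) :
    isAllConnectedScan v rs = true ↔ ∃ r ∈ rs, v ∈ r := by
  induction rs with
  | nil => simp [isAllConnectedScan]
  | cons r rest ih =>
      by_cases h : r.contains v <;>
        simp_all [isAllConnectedScan]

theorem mem_fold_update (v : Int) (rs : List (List Int)) (s : PySem.Set Int) :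
    v ∈ rs.foldl (fun s relation => PySem.Set.update s relation) s ↔
      v ∈ s ∨ ∃ r ∈ rs, v ∈ r := by
  induction rs generalizing s with
  | nil => simp
  | cons r rest ih =>
      simp [List.foldl, ih, PySem.Set.mem_update, or_assoc]

theorem alt_iff (vertices : List Int) (relations : List (List Int)) :
    isAllConnected_alt vertices relations = true ↔
      ∀ v ∈ vertices, ∃ r ∈ relations, v ∈ r := by
  simp [isAllConnected_alt, PySem.Set.issubset_iff, PySem.Set.mem_ofList,
        mem_fold_update, PySem.Set.empty]

theorem a_iff (vertices : List Int) (relations : List (List Int)) :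
    isAllConnected vertices relations = true ↔
      ∀ v ∈ vertices, ∃ r ∈ relations, v ∈ r := by
  induction vertices with
  | nil => simp [isAllConnected]
  | cons v rest ih =>
      rw [isAllConnected]
      by_cases h : isAllConnectedScan v relations = true
      · simp [h, ih, (scan_iff v relations).mp h]
      · simp [h, ← scan_iff]

-- ===== VERDICT (by name: the statement is the Claim_ definition above) =====
theorem isAllConnected_spec : Claim_equal_isAllConnected := by
  intro vertices relations _
  unfold Spec_isAllConnected
  rw [Bool.eq_iff_iff, a_iff, alt_iff]
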